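-- pv_equiv track=rewrite | github.com/kkhuong/advantage-gambling | UTH.py | runner_runner_flush_draw
-- ===== SOURCE A (Python) =====
-- import collections
-- import copy
--
-- def runner_runner_flush_draw(hand, board):
--     """Indicate whether the hand has a runner-runner flush draw. That is, if two
--     more card of the modal suit were to come onto the board, the hand would
--     become a flush.
--
--     [Does the same thing as flush_draw() but with one line changed]
--
--     Assumptions:
--         Though it does not make sense to use this function on a board of 5 cards,
--         we use this function as a helper for live_3_flush(hand, )
--
--     Args:
--         hand: A list containing (up to 2) cards (string representation)
--         board: A list containing (up to 5) cards (string representation)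
--
--     Examples:
--         >>> runner_runner_flush_draw(['Th'], ['Js', '4h', '2h'])
--         True
--
--     Returns:
--         Returns a two-tuple (b, s) where
--             b is a boolean indicating the existence of 4-flush
--             s is a character indicating the modal suit
--     """
--     cards = copy.deepcopy(hand) + copy.deepcopy(board)
--     suits = [c[1] for c in cards]
--
--     suit_counts = collections.Counter(suits)
--     for suit, count in suit_counts.items():
--         if count >= 3 and has_suit_in_hand(suit, hand):
--             return (True, suit)
--     return (False, None)
--
-- def has_suit_in_hand(s, hand):
--     """Do you have a card of suit s? This might be useful if we are designing
--     a bluff catcher.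
--
--     Args:
--         s: A character indicating suit (i.e., 'd', 'h', 's', or 'c')
--         hand: A list containing (up to 2) cards (string representation)
--
--     Examples:
--         >>> has_suit_in_hand('h', ['Ah'])
--         True
--
--         >>> has_suit_in_hand('h', ['As', 'Kd'])
--         False
--
--     Returns:
--         A boolean.
--     """
--     suits = { c[1] for c in hand }
--     return s in suits
-- ===== SOURCE B (Python) =====
-- def runner_runner_flush_draw(hand, board):
--     cards = hand + board
--     for card in hand:
--         suit = card[1]
--         if sum(1 for c in cards if c[1] == suit) >= 3:
--             return (True, suit)
--     return (False, None)
-- ===== Notes on version B (the rewrite author's own statement) =====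
-- stated objective: simpler
-- what changed: B drops the deep copies, the Counter and the hand-suit set: it scans hand in order and, for each hand card, counts that card's suit across hand+board with one direct scan, returning on the first suit with count >= 3.
import Mathlib
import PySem

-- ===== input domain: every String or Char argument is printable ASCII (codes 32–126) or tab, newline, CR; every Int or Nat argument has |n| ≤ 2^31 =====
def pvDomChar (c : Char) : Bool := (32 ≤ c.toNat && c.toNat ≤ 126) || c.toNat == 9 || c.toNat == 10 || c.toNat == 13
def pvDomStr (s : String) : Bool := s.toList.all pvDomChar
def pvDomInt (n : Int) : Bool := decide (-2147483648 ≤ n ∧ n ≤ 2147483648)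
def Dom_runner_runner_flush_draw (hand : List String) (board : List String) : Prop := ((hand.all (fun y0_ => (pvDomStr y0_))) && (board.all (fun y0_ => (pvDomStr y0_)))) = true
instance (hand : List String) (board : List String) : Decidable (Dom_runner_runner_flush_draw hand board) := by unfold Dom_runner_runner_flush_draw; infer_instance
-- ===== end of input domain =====

-- B replaces A's Counter + hand-suit set + deep copies by a direct in-order scan of hand,
-- counting each hand card's suit across hand+board (objective: simpler). No mutation occurs in A.

-- ===== PORT A =====
-- c[1] as the 1-character string Python returns; Pre_ guarantees the index is in range (getD "" unreachable inside Pre_)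
def pvSuit (c : String) : String := ((PySem.Str.pyGet? c 1).map (fun ch => String.ofList [ch])).getD ""

def has_suit_in_hand (s : String) (hand : List String) : Bool :=
  PySem.Set.contains (PySem.Set.ofList (hand.map (fun c => pvSuit c))) s

-- the 'for suit, count in suit_counts.items()' loop with its early return
def pvALoop (hand : List String) : List (String × Int) → Bool × Option String
  | [] => (false, none)
  | (suit, count) :: rest =>
      if 3 ≤ count ∧ has_suit_in_hand suit hand = true then (true, some suit)
      else pvALoop hand rest

def runner_runner_flush_draw (hand : List String) (board : List String) : Bool × Option String :=
  let cards := hand ++ board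
  let suits := cards.map (fun c => pvSuit c)
  let suit_counts := PySem.Dict.counter suits
  pvALoop hand suit_counts.items

-- ===== PORT B =====
-- the 'for card in hand' loop; the inner sum(1 for c in cards if c[1] == suit) is the countP
def pvBLoop (cards : List String) : List String → Bool × Option String
  | [] => (false, none)
  | card :: rest =>
      let suit := pvSuit card
      if 3 ≤ (cards.countP (fun c => pvSuit c == suit) : Int) then (true, some suit)
      else pvBLoop cards rest

def runner_runner_flush_draw_alt (hand : List String) (board : List String) : Bool × Option String :=
  let cards := hand ++ board
  pvBLoop cards hand

-- ===== PRECONDITION & SPEC =====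
-- Pre_ excludes exactly the inputs where Python A raises IndexError: some card string shorter than 2 characters.
def Pre_runner_runner_flush_draw (hand : List String) (board : List String) : Prop :=
  ∀ c ∈ hand ++ board, (2 : Int) ≤ PySem.Str.len c
instance (hand : List String) (board : List String) : Decidable (Pre_runner_runner_flush_draw hand board) := by unfold Pre_runner_runner_flush_draw; infer_instance
def pvWitness_runner_runner_flush_draw : List String × List String := (["Th"], ["Js", "4h", "2h"])

def Spec_runner_runner_flush_draw (hand : List String) (board : List String) (out : Bool × Option String) : Prop := out = runner_runner_flush_draw_alt hand board
instance (hand : List String) (board : List String) (out : Bool × Option String) : Decidable (Spec_runner_runner_flush_draw hand board out) := by unfold Spec_runner_runner_flush_draw; infer_instance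

-- ===== CLAIM (what is proved, stated in full; the proofs are below) =====
def Claim_equal_runner_runner_flush_draw : Prop := ∀ (hand : List String) (board : List String), Dom_runner_runner_flush_draw hand board → Pre_runner_runner_flush_draw hand board → Spec_runner_runner_flush_draw hand board (runner_runner_flush_draw hand board)

-- ===== LEMMAS AND PROOFS =====

-- A's loop is a find? over the items list
theorem pvALoop_eq_find? (hand : List String) (items : List (String × Int)) :
    pvALoop hand items =
      match items.find? (fun p => decide (3 ≤ p.2) && has_suit_in_hand p.1 hand) with
      | some p => (true, some p.1)
      | none => (false, none) := by
  induction items with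
  | nil => rfl
  | cons p rest ih =>
      obtain ⟨s, c⟩ := p
      by_cases h : 3 ≤ c ∧ has_suit_in_hand s hand = true
      · simp [pvALoop, h]
      · have hb : (decide (3 ≤ c) && has_suit_in_hand s hand) = false := by
          cases hcs : has_suit_in_hand s hand with
          | false => simp
          | true =>
              have h1 : ¬ 3 ≤ c := fun h1 => h ⟨h1, hcs⟩
              simp [h1]
        simp [pvALoop, h, hb, ih]

-- B's loop is a find? over hand
theorem pvBLoop_eq_find? (cards : List String) (hand : List String) :
    pvBLoop cards hand =
      match hand.find? (fun card => decide (3 ≤ (cards.countP (fun c => pvSuit c == pvSuit card) : Int))) with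
      | some card => (true, some (pvSuit card))
      | none => (false, none) := by
  induction hand with
  | nil => rfl
  | cons card rest ih =>
      by_cases h : 3 ≤ (cards.countP (fun c => pvSuit c == pvSuit card) : Int)
      · have h' : 3 ≤ cards.countP (fun c => pvSuit c == pvSuit card) := by exact_mod_cast h
        simp [pvBLoop, h, h']
      · have h' : ¬ 3 ≤ cards.countP (fun c => pvSuit c == pvSuit card) := by exact_mod_cast h
        simp [pvBLoop, h, h', ih]

theorem find?_congr_mem {α : Type} {p q : α → Bool} :
    ∀ (l : List α), (∀ a ∈ l, p a = q a) → l.find? p = l.find? q := by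
  intro l
  induction l with
  | nil => intro _; rfl
  | cons x t ih =>
      intro h
      have hx := h x (by simp)
      by_cases hp : p x = true
      · simp [hp, hx ▸ hp]
      · have hq : q x ≠ true := by rw [← hx]; exact hp
        simp [hp, hq, ih (fun a ha => h a (by simp [ha]))]

-- find? over a Set built by foldl add: dedup and ordering do not change the first match
theorem find?_foldl_add {α : Type} [BEq α] [LawfulBEq α] (p : α → Bool) :
    ∀ (l acc : List α), ((l.foldl PySem.Set.add acc).find? p) = (acc.find? p).or (l.find? p) := by
  intro l
  induction l with
  | nil => intro acc; simp [List.foldl_nil]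
  | cons x t ih =>
      intro acc
      have step : (x :: t).foldl PySem.Set.add acc = t.foldl PySem.Set.add (PySem.Set.add acc x) := rfl
      rw [step, ih]
      by_cases hx : PySem.Set.contains acc x = true
      · have hmem0 : x ∈ acc := List.contains_iff_mem.mp hx
        have hadd : PySem.Set.add acc x = acc := by
          unfold PySem.Set.add
          simp [hmem0]
        rw [hadd]
        cases h : acc.find? p with
        | some v => simp
        | none =>
            have hmem : x ∈ acc := by
              have hx' : acc.contains x = true := hx
              exact List.contains_iff_mem.mp hx' 
            have hpx : p x = false := by
              have := List.find?_eq_none.mp h x hmem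
              simpa using this
            simp [hpx]
      · have hmem0 : x ∉ acc := fun hm => hx (List.contains_iff_mem.mpr hm)
        have hadd : PySem.Set.add acc x = acc ++ [x] := by
          unfold PySem.Set.add
          simp [hmem0]
        rw [hadd, List.find?_append]
        cases h : acc.find? p with
        | some v => simp
        | none =>
            by_cases hpx : p x = true
            · simp [hpx]
            · simp [hpx]

theorem has_suit_iff (s : String) (hand : List String) :
    has_suit_in_hand s hand = true ↔ s ∈ hand.map (fun c => pvSuit c) := by
  unfold has_suit_in_hand
  constructor
  · intro h
    have : s ∈ PySem.Set.ofList (hand.map (fun c => pvSuit c)) := by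
      simpa [PySem.Set.contains] using h
    exact (PySem.Set.mem_ofList _ _).mp this
  · intro h
    have : s ∈ PySem.Set.ofList (hand.map (fun c => pvSuit c)) := (PySem.Set.mem_ofList _ _).mpr h
    simpa [PySem.Set.contains] using this

-- ===== VERDICT (by name: the statement is the Claim_ definition above) =====
theorem runner_runner_flush_draw_spec : Claim_equal_runner_runner_flush_draw := by
  unfold Claim_equal_runner_runner_flush_draw
  intro hand board _ _
  unfold Spec_runner_runner_flush_draw
  show pvALoop hand (PySem.Dict.counter ((hand ++ board).map (fun c => pvSuit c))).items
      = pvBLoop (hand ++ board) hand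
  set cards := hand ++ board with hcards
  set suits := cards.map (fun c => pvSuit c) with hsuits
  set hs := hand.map (fun c => pvSuit c) with hhs
  set bs := board.map (fun c => pvSuit c) with hbs
  have hsplit : suits = hs ++ bs := by simp [hsuits, hcards, hhs, hbs]
  -- the two loop shapes
  rw [pvALoop_eq_find?, pvBLoop_eq_find?, PySem.Dict.items_counter, List.find?_map]
  -- abbreviate the count predicate
  set q : String → Bool := fun s => decide (3 ≤ (suits.count s : Int)) with hq
  have hcount : ∀ s : String, (cards.countP (fun c => pvSuit c == s) : Int) = (suits.count s : Int) := by
    intro s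
    have : suits.count s = cards.countP (fun c => pvSuit c == s) := by
      rw [hsuits, List.count_eq_countP, List.countP_map]
      rfl
    rw [this]
  have hBpred : (fun card => decide (3 ≤ (cards.countP (fun c => pvSuit c == pvSuit card) : Int)))
      = (fun card => q (pvSuit card)) := by
    funext card; rw [hcount, hq]
  -- A's find? over the counter keys reduces to hs.find? q
  have hApred : ((fun p : String × Int => decide (3 ≤ p.2) && has_suit_in_hand p.1 hand) ∘
      (fun k => (k, (suits.count k : Int)))) = fun k => q k && has_suit_in_hand k hand := by
    funext k; simp [hq]
  have hofList : PySem.Set.ofList suits = suits.foldl PySem.Set.add [] := rfl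
  have hAfind : (PySem.Set.ofList suits).find? (fun k => q k && has_suit_in_hand k hand)
      = hs.find? q := by
    rw [hofList, find?_foldl_add]
    have : (List.find? (fun k => q k && has_suit_in_hand k hand) ([] : List String)) = none := rfl
    rw [this, Option.none_or, hsplit, List.find?_append]
    have hhsf : hs.find? (fun k => q k && has_suit_in_hand k hand) = hs.find? q := by
      apply find?_congr_mem
      intro a ha
      have : has_suit_in_hand a hand = true := (has_suit_iff a hand).mpr (hhs ▸ ha)
      simp [this]
    rw [hhsf]
    cases h : hs.find? q with
    | some v => simp
    | none =>
        have hqnone : ∀ a ∈ hs, q a = false := by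
          intro a ha
          have := List.find?_eq_none.mp h a ha
          simpa using this
        have : bs.find? (fun k => q k && has_suit_in_hand k hand) = none := by
          rw [List.find?_eq_none]
          intro b _
          by_cases hb : has_suit_in_hand b hand = true
          · have hbhs : b ∈ hs := hhs ▸ (has_suit_iff b hand).mp hb
            simp [hqnone b hbhs]
          · simp [hb]
        simp [this]
  rw [hApred, hAfind, hBpred]
  -- hs.find? q is the mapped hand.find?
  have hmapfind : hs.find? q = (hand.find? (fun card => q (pvSuit card))).map (fun c => pvSuit c) := by
    rw [hhs, List.find?_map]; rfl
  rw [hmapfind]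
  cases h : hand.find? (fun card => q (pvSuit card)) with
  | some card => simp
  | none => simp
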